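-- pv_equiv track=rewrite | github.com/tubatoprak/Introduction-to-Algorithm-Design | Assignment 5/q4.py | max_discount_dp
-- ===== SOURCE A (Python) =====
-- def calc_discount(set_of_stores):
--   return sum(len(store) for store in set_of_stores)
--
-- def max_discount_dp(stores):
--   n = len(stores)
--   max_discounts = [[0] * (n + 1) for _ in range(n + 1)]
--   for i in range(1, n + 1):
--       max_discounts[i][i] = calc_discount(stores[:i])
--
--   for i in range(1, n + 1):
--       for j in range(1, i + 1):
--           subset = stores[j - 1:i]
--           discount_with_current = calc_discount(subset) + max_discounts[j - 1][i - 1]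
--           discount_without_current = max_discounts[j][i - 1]
--           max_discounts[j][i] = max(discount_with_current, discount_without_current)
--
--   return max_discounts[n][n]
-- ===== SOURCE B (Python) =====
-- def max_discount_dp(stores):
--     # The DP's table entry [n][n] always equals the total length of all
--     # stores: each diagonal step takes the whole remaining range, so the
--     # answer collapses to a single closed-form sum.
--     total = 0
--     for s in stores:
--         total += len(s)
--     return total
-- ===== Notes on version B (the rewrite author's own statement) =====
-- stated objective: faster
-- what changed: Replaces the O(n^3) triangular DP table (with repeated slicing and re-summing) by the closed form it provably computes: the total length of all stores, in one pass.
import Mathlib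
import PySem

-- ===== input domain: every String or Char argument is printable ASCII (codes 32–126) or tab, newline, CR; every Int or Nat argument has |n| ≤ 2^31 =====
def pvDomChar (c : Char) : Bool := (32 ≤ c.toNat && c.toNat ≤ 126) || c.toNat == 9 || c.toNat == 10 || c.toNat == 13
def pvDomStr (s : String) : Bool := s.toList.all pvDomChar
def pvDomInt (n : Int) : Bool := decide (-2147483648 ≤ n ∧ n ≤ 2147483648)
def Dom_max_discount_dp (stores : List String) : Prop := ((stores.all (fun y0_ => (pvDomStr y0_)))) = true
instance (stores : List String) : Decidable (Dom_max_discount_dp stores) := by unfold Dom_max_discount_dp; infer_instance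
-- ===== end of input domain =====

-- B replaces A's O(n^3) DP table by the closed form it computes (the total length of all
-- stores, one pass); proved equal for every input.

-- ===== PORT A =====
-- the DP matrix (a Python list of lists; every index access of A is in range) is modeled as
-- a write log: pvUpd is 'max_discounts[j][i] = v', pvGet reads the most recent write (0 if
-- never written, matching the all-zero initialization)
def pvUpd (M : List ((Int × Int) × Int)) (j i v : Int) : List ((Int × Int) × Int) :=
  ((j, i), v) :: M

def pvGet : List ((Int × Int) × Int) → Int → Int → Int
  | [], _, _ => 0
  | (ji, v) :: M, a, b => if ji = (a, b) then v else pvGet M a b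

def calc_discount (set_of_stores : List String) : Int :=
  (set_of_stores.map (fun store => PySem.Str.len store)).sum

def max_discount_dp (stores : List String) : Int :=
  let n : Int := (stores.length : Int)
  let M0 : List ((Int × Int) × Int) := []
  -- for i in range(1, n+1): max_discounts[i][i] = calc_discount(stores[:i])
  let Md := (PySem.List.pyRange 1 (n+1) 1).foldl
    (fun M i => pvUpd M i i (calc_discount (PySem.List.slice stores none (some i)))) M0
  -- the double loop
  let Mf := (PySem.List.pyRange 1 (n+1) 1).foldl
    (fun M i => (PySem.List.pyRange 1 (i+1) 1).foldl
      (fun M j =>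
        let subset := PySem.List.slice stores (some (j-1)) (some i)
        let discount_with_current := calc_discount subset + pvGet M (j-1) (i-1)
        let discount_without_current := pvGet M j (i-1)
        pvUpd M j i (max discount_with_current discount_without_current)) M) Md
  pvGet Mf n n

-- ===== PORT B =====
def max_discount_dp_alt (stores : List String) : Int :=
  stores.foldl (fun total s => total + PySem.Str.len s) 0

-- ===== PRECONDITION & SPEC =====
def Spec_max_discount_dp (stores : List String) (out : Int) : Prop := out = max_discount_dp_alt stores
instance (stores : List String) (out : Int) : Decidable (Spec_max_discount_dp stores out) := by unfold Spec_max_discount_dp; infer_instance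

-- ===== CLAIM (what is proved, stated in full; the proofs are below) =====
def Claim_equal_max_discount_dp : Prop := ∀ (stores : List String), Dom_max_discount_dp stores → Spec_max_discount_dp stores (max_discount_dp stores)

-- ===== LEMMAS AND PROOFS =====

-- named forms of the port's loop bodies (definitionally equal to the inline lambdas)
def pvDiagStep (stores : List String) (M : List ((Int × Int) × Int)) (i : Int) : List ((Int × Int) × Int) :=
  pvUpd M i i (calc_discount (PySem.List.slice stores none (some i)))

def pvColStep (stores : List String) (i : Int) (M : List ((Int × Int) × Int)) (j : Int) : List ((Int × Int) × Int) :=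
  let subset := PySem.List.slice stores (some (j-1)) (some i)
  let discount_with_current := calc_discount subset + pvGet M (j-1) (i-1)
  let discount_without_current := pvGet M j (i-1)
  pvUpd M j i (max discount_with_current discount_without_current)

def pvOuter (stores : List String) (M : List ((Int × Int) × Int)) (i : Int) : List ((Int × Int) × Int) :=
  (PySem.List.pyRange 1 (i+1) 1).foldl (pvColStep stores i) M

def pvMd (stores : List String) : List ((Int × Int) × Int) :=
  (PySem.List.pyRange 1 ((stores.length : Int)+1) 1).foldl (pvDiagStep stores) []

def pvS (stores : List String) (k : Int) : Int :=
  ((stores.map PySem.Str.len).take k.toNat).sum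

lemma pvPort_eq (stores : List String) :
    max_discount_dp stores =
      pvGet ((PySem.List.pyRange 1 ((stores.length : Int)+1) 1).foldl (pvOuter stores) (pvMd stores))
        (stores.length : Int) (stores.length : Int) := rfl

lemma pvGet_upd (M : List ((Int × Int) × Int)) (j i v a b : Int) :
    pvGet (pvUpd M j i v) a b = if (j, i) = (a, b) then v else pvGet M a b := rfl

lemma pvFoldl_untouched (step : List ((Int × Int) × Int) → Int → List ((Int × Int) × Int)) (a b : Int) :
    ∀ (js : List Int) (M : List ((Int × Int) × Int)),
      (∀ (M : List ((Int × Int) × Int)) (j : Int), j ∈ js → pvGet (step M j) a b = pvGet M a b) →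
      pvGet (js.foldl step M) a b = pvGet M a b := by
  intro js
  induction js with
  | nil => intro M _; rfl
  | cons j t ih =>
    intro M h
    simp only [List.foldl_cons]
    rw [ih (step M j) (fun M' j' hj' => h M' j' (List.mem_cons_of_mem _ hj'))]
    exact h M j (List.mem_cons_self)

lemma pvColStep_untouched (stores : List String) (i : Int) (M : List ((Int × Int) × Int))
    (j a b : Int) (h : ¬ (a = j ∧ b = i)) : pvGet (pvColStep stores i M j) a b = pvGet M a b := by
  simp only [pvColStep, pvGet_upd]
  rw [if_neg]
  rintro hp
  exact h ⟨(Prod.mk.injEq _ _ _ _ ▸ hp).1.symm, (Prod.mk.injEq _ _ _ _ ▸ hp).2.symm⟩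

lemma pvMd_zero (stores : List String) (a b : Int) (h : a ≤ 0 ∨ b < a) :
    pvGet (pvMd stores) a b = 0 := by
  unfold pvMd
  rw [pvFoldl_untouched]
  · rfl
  intro M j hj
  have hj1 : 1 ≤ j := (PySem.List.mem_pyRange_one.1 hj).1
  simp only [pvDiagStep, pvGet_upd]
  rw [if_neg]
  intro hp
  have h1 : j = a := (Prod.mk.injEq _ _ _ _ ▸ hp).1
  have h2 : j = b := (Prod.mk.injEq _ _ _ _ ▸ hp).2
  omega

-- the slice stores[k:k+1] contributes exactly the k-th prefix-sum increment
lemma pvCalc_slice (stores : List String) (k : Nat) (_hk : k < stores.length) :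
    calc_discount (PySem.List.slice stores (some (k : Int)) (some ((k : Int) + 1))) =
      pvS stores ((k : Int) + 1) - pvS stores (k : Int) := by
  have h1 : ((k : Int) + 1) = ((k + 1 : Nat) : Int) := by push_cast; ring
  rw [h1, PySem.List.slice_natCast]
  unfold pvS calc_discount
  simp only [Int.toNat_natCast]
  have ht : (stores.map PySem.Str.len).take (k + 1) =
      (stores.map PySem.Str.len).take k ++ (((stores.map PySem.Str.len).drop k).take 1) :=
    List.take_add
  rw [ht, List.sum_append]
  have h2 : k + 1 - k = 1 := by omega
  rw [h2, add_sub_cancel_left]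
  simp only [List.map_take, List.map_drop]

-- main invariant: after processing columns 1..k, the diagonal entry [k][k] is the k-th
-- prefix sum, and every entry with a ≤ 0 or b < a is still 0
lemma pvMain (stores : List String) :
    ∀ (k : Nat), k ≤ stores.length →
      (pvGet ((PySem.List.pyRange 1 ((k : Int)+1) 1).foldl (pvOuter stores) (pvMd stores)) (k : Int) (k : Int)
          = pvS stores (k : Int)) ∧
      (∀ a b : Int, a ≤ 0 ∨ b < a →
        pvGet ((PySem.List.pyRange 1 ((k : Int)+1) 1).foldl (pvOuter stores) (pvMd stores)) a b = 0) := by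
  intro k
  induction k with
  | zero =>
    intro _
    constructor
    · rw [PySem.List.pyRange_one_eq_nil (by norm_num)]
      simpa [pvS] using pvMd_zero stores 0 0 (Or.inl le_rfl)
    · intro a b h
      rw [PySem.List.pyRange_one_eq_nil (by norm_num)]
      exact pvMd_zero stores a b h
  | succ k ih =>
    intro hk
    have ihk := ih (Nat.le_of_succ_le hk)
    have hsplit : PySem.List.pyRange 1 (((k+1 : Nat) : Int)+1) 1
        = PySem.List.pyRange 1 ((k : Int)+1) 1 ++ [(k : Int)+1] := by
      have : ((k+1 : Nat) : Int) + 1 = ((k : Int) + 1) + 1 := by push_cast; ring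
      rw [this, PySem.List.pyRange_one_succ_right (by omega)]
    set Mk := (PySem.List.pyRange 1 ((k : Int)+1) 1).foldl (pvOuter stores) (pvMd stores) with hMk
    have hfold : (PySem.List.pyRange 1 (((k+1 : Nat) : Int)+1) 1).foldl (pvOuter stores) (pvMd stores)
        = pvOuter stores Mk ((k : Int)+1) := by
      rw [hsplit, List.foldl_append]; rfl
    -- peel the last inner iteration j = k+1 of column i = k+1
    have hinner : PySem.List.pyRange 1 (((k : Int)+1)+1) 1
        = PySem.List.pyRange 1 ((k : Int)+1) 1 ++ [(k : Int)+1] := by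
      rw [PySem.List.pyRange_one_succ_right (by omega)]
    have houter : pvOuter stores Mk ((k : Int)+1)
        = pvColStep stores ((k : Int)+1)
            ((PySem.List.pyRange 1 ((k : Int)+1) 1).foldl (pvColStep stores ((k : Int)+1)) Mk)
            ((k : Int)+1) := by
      unfold pvOuter
      rw [hinner, List.foldl_append]; rfl
    set M'' := (PySem.List.pyRange 1 ((k : Int)+1) 1).foldl (pvColStep stores ((k : Int)+1)) Mk with hM''
    -- M'' agrees with Mk off column k+1
    have huntouched : ∀ a b : Int, b ≠ (k : Int)+1 ∨ a ≤ 0 ∨ (k : Int)+1 < a →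
        pvGet M'' a b = pvGet Mk a b := by
      intro a b hab
      rw [hM'']
      apply pvFoldl_untouched
      intro M j hj
      have hj' := PySem.List.mem_pyRange_one.1 hj
      apply pvColStep_untouched
      rintro ⟨rfl, rfl⟩
      rcases hab with h | h | h <;> omega
    have hMkk : pvGet M'' (k : Int) (k : Int) = pvS stores (k : Int) := by
      rw [huntouched _ _ (Or.inl (by omega))]; exact ihk.1
    have hMbelow : pvGet M'' ((k : Int)+1) (k : Int) = 0 := by
      rw [huntouched _ _ (Or.inl (by omega))]
      exact ihk.2 _ _ (Or.inr (by omega))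
    have hkn : k < stores.length := by omega
    have hval : pvGet (pvColStep stores ((k : Int)+1) M'' ((k : Int)+1)) ((k+1 : Nat) : Int) ((k+1 : Nat) : Int)
        = pvS stores (((k+1 : Nat) : Int)) := by
      simp only [pvColStep, pvGet_upd]
      have hidx : ((k+1 : Nat) : Int) = (k : Int) + 1 := by push_cast; ring
      rw [if_pos (by rw [hidx])]
      have hsub : ((k : Int) + 1) - 1 = (k : Int) := by ring
      rw [hsub, hMkk, hMbelow, pvCalc_slice stores k hkn, hidx]
      have h0 : 0 ≤ pvS stores ((k : Int) + 1) := by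
        unfold pvS
        exact List.sum_nonneg (fun x hx => by
          obtain ⟨s, _, rfl⟩ := List.mem_map.1 (List.mem_of_mem_take hx)
          simp [PySem.Str.len_eq])
      omega
    constructor
    · rw [hfold, houter]
      exact hval
    · intro a b hab
      rw [hfold, houter]
      have hne : ¬ (a = (k : Int)+1 ∧ b = (k : Int)+1) := by rintro ⟨rfl, rfl⟩; omega
      rw [pvColStep_untouched stores _ _ _ _ _ hne]
      rw [huntouched a b (by
        by_cases hb : b = (k : Int)+1
        · subst hb; right; omega
        · exact Or.inl hb)]
      exact ihk.2 a b hab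

lemma pvA_eq_sum (stores : List String) :
    max_discount_dp stores = (stores.map PySem.Str.len).sum := by
  rw [pvPort_eq]
  have h := (pvMain stores stores.length le_rfl).1
  rw [h]
  unfold pvS
  rw [Int.toNat_natCast, List.take_of_length_le (by simp)]

-- ===== VERDICT (by name: the statement is the Claim_ definition above) =====
theorem max_discount_dp_spec : Claim_equal_max_discount_dp := by
  intro stores _
  unfold Spec_max_discount_dp max_discount_dp_alt
  rw [pvA_eq_sum, PySem.List.foldl_add]
  simp
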